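-- pv_equiv track=rewrite | github.com/Theo0x1337/PolyChess | blocageFou.py | decendreGauche
-- ===== SOURCE A (Python) =====
-- def decendreGauche(pos):#WORK
--     #x=x-1
--     #y=y+1
--     res=[]
--     x=pos[0]
--     y=pos[1]
--     while x > 0  and y < 7 :
--         x=x-1
--         y=y+1
--         res.append([x,y])
--     return res
-- ===== SOURCE B (Python) =====
-- def decendreGauche(pos):
--     n = max(0, min(pos[0], 7 - pos[1]))
--     return [[pos[0] - i, pos[1] + i] for i in range(1, n + 1)]
-- ===== Notes on version B (the rewrite author's own statement) =====
-- stated objective: simpler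
-- what changed: Replaces the guard-driven while loop with incremental x/y mutation by a closed-form step count n = max(0, min(pos[0], 7 - pos[1])) and a single comprehension deriving each square from its offset.
import Mathlib
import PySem

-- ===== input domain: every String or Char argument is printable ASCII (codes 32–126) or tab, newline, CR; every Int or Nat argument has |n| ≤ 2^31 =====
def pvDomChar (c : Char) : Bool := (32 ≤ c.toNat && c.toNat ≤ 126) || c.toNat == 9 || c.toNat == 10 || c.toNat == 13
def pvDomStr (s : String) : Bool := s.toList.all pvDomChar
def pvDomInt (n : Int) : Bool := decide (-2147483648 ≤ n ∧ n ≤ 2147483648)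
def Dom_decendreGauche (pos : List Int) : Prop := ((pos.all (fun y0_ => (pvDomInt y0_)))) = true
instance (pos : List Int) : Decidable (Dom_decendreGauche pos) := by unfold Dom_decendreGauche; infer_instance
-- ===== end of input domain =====

-- B replaces A's guard-driven while loop by a closed-form step count and one comprehension (objective: simpler).

-- ===== PORT A =====
-- the while loop: x,y mutate; each iteration appends [x-1,y+1] after the update
def pvLoopA (x y : Int) : List (List Int) :=
  if h : x > 0 ∧ y < 7 then [x - 1, y + 1] :: pvLoopA (x - 1) (y + 1) else []
termination_by x.toNat
decreasing_by omega

def decendreGauche (pos : List Int) : List (List Int) :=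
  let x := (PySem.List.pyGet? pos 0).getD 0   -- first element; Pre_ guarantees it exists
  let y := (PySem.List.pyGet? pos 1).getD 0   -- second element
  pvLoopA x y

-- ===== PORT B =====
def decendreGauche_alt (pos : List Int) : List (List Int) :=
  let x := (PySem.List.pyGet? pos 0).getD 0
  let y := (PySem.List.pyGet? pos 1).getD 0
  let n := max 0 (min x (7 - y))
  (PySem.List.pyRange 1 (n + 1) 1).map (fun i => [x - i, y + i])

-- ===== PRECONDITION & SPEC =====
-- Pre_ excludes lists shorter than two elements, on which A raises IndexError (B raises too)
def Pre_decendreGauche (pos : List Int) : Prop := 2 ≤ pos.length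
instance (pos : List Int) : Decidable (Pre_decendreGauche pos) := by unfold Pre_decendreGauche; infer_instance
def pvWitness_decendreGauche : List Int := [3, 4]

def Spec_decendreGauche (pos : List Int) (out : List (List Int)) : Prop := out = decendreGauche_alt pos
instance (pos : List Int) (out : List (List Int)) : Decidable (Spec_decendreGauche pos out) := by unfold Spec_decendreGauche; infer_instance

-- ===== CLAIM (what is proved, stated in full; the proofs are below) =====
def Claim_equal_decendreGauche : Prop := ∀ (pos : List Int), Dom_decendreGauche pos → Pre_decendreGauche pos → Spec_decendreGauche pos (decendreGauche pos)

-- ===== LEMMAS AND PROOFS =====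
lemma pvLoopA_eq (x y : Int) :
    pvLoopA x y = (PySem.List.pyRange 1 (max 0 (min x (7 - y)) + 1) 1).map (fun i => [x - i, y + i]) := by
  induction x, y using pvLoopA.induct with
  | case1 x y h ih =>
    rw [pvLoopA]
    simp only [h, and_self, dif_pos]
    rw [ih]
    rw [PySem.List.pyRange_one, PySem.List.pyRange_one, List.map_map, List.map_map]
    have h1 : (max 0 (min (x - 1) (7 - (y + 1))) + 1 - 1).toNat
            = (max 0 (min x (7 - y)) + 1 - 1).toNat - 1 := by omega
    have h2 : (max 0 (min x (7 - y)) + 1 - 1).toNat = ((max 0 (min x (7 - y)) + 1 - 1).toNat - 1) + 1 := by omega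
    rw [h1, h2, List.range_succ_eq_map, List.map_cons, List.map_map]
    simp only [List.cons.injEq, Function.comp_apply, Nat.cast_zero]
    refine ⟨by norm_num, ?_⟩
    apply List.map_congr_left
    intro k _
    simp only [Function.comp_apply, List.cons.injEq, and_true]
    push_cast
    constructor <;> ring
  | case2 x y h =>
    rw [pvLoopA]
    rw [dif_neg h]
    have : max 0 (min x (7 - y)) = 0 := by omega
    rw [this]
    simp

-- ===== VERDICT (by name: the statement is the Claim_ definition above) =====
theorem decendreGauche_spec : Claim_equal_decendreGauche := by
  intro pos _ _
  unfold Spec_decendreGauche decendreGauche decendreGauche_alt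
  simp only
  exact pvLoopA_eq _ _
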